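-- pv_equiv track=rewrite | github.com/instructlab/sdg | src/instructlab/sdg/utils/docprocessor.py | fuse_texts
-- ===== SOURCE A (Python) =====
-- def fuse_texts(text_list, short_length_threshold=100):
--     """
--     Fuse short texts with preceding longer texts if their word count is below the threshold.
--     Args:
--         text_list (list): List of text chunks to process.
--         short_length_threshold (int): The word count threshold for determining short texts.
--     Returns:
--         list: List of fused texts.
--     """
--     fused_texts = []
--     previous_long_text = ""
--
--     for text in text_list:
--         word_count = len(text.split())
--
--         if word_count <= short_length_threshold and previous_long_text:
--             # Append the short text to the last long text
--             fused_texts[-1] += "\n\n" + text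
--         else:
--             # This is a long text, so add it to the list and remember it
--             fused_texts.append(text)
--             previous_long_text = text
--
--     return fused_texts
-- ===== SOURCE B (Python) =====
-- def fuse_texts(text_list, short_length_threshold=100):
--     """Two-level scan by index: each outer step takes one anchor, the inner
--     while-loop consumes the maximal run of short texts following a non-empty
--     anchor, and the group is joined once. No carried previous-text state."""
--     def is_short(t):
--         return len(t.split()) <= short_length_threshold
--
--     out = []
--     i, n = 0, len(text_list)
--     while i < n:
--         head = text_list[i]
--         i += 1
--         if head:
--             group = [head]
--             while i < n and is_short(text_list[i]):
--                 group.append(text_list[i])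
--                 i += 1
--             out.append("\n\n".join(group))
--         else:
--             out.append(head)
--     return out
-- ===== Notes on version B (the rewrite author's own statement) =====
-- stated objective: faster
-- what changed: B replaces A's single pass with a carried previous_long_text flag and repeated in-place concatenation onto fused_texts[-1] by a two-level index scan: the outer loop picks an anchor, an inner while-loop consumes the maximal run of following short texts (only after a non-empty anchor), and each group is joined once.
import Mathlib
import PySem

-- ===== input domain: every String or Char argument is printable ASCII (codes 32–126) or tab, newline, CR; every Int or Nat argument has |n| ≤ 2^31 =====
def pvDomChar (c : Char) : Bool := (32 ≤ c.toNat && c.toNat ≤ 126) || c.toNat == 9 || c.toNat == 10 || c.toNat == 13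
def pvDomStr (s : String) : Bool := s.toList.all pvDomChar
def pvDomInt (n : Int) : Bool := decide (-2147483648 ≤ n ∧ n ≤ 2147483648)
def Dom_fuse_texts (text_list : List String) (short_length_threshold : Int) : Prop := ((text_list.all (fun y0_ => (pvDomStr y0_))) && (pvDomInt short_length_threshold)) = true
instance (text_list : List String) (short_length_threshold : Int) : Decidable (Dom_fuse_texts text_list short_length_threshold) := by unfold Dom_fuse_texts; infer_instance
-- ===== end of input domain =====

-- B replaces A's single pass with a carried previous_long_text flag by a two-level
-- scan (anchor, then the maximal run of following short texts, joined once).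

-- ===== PORT A =====
-- state: (fused_texts, previous_long_text); fused_texts[-1] += s is modelled as
-- dropLast ++ [getLastD "" ++ s] (the branch only runs when fused_texts is nonempty,
-- since previous_long_text is truthy only after an append).
def fuseStepA (th : Int) (st : List String × String) (text : String) : List String × String :=
  if ((PySem.Str.split₀ text).length : Int) ≤ th ∧ st.2 ≠ "" then
    (st.1.dropLast ++ [st.1.getLastD "" ++ "\n\n" ++ text], st.2)
  else
    (st.1 ++ [text], text)

def fuse_texts (text_list : List String) (short_length_threshold : Int) : List String :=
  (text_list.foldl (fuseStepA short_length_threshold) ([], "")).1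

-- ===== PORT B =====
-- is_short from Source B
def shortB (th : Int) (t : String) : Bool := ((PySem.Str.split₀ t).length : Int) ≤ th

-- Source B's inner while-loop: the maximal prefix of short texts together with the rest
def spanShort (th : Int) : List String → List String × List String
  | [] => ([], [])
  | t :: ts =>
    if shortB th t then
      ((spanShort th ts).1.cons t, (spanShort th ts).2)
    else
      ([], t :: ts)

theorem spanShort_len (th : Int) : ∀ ts : List String, (spanShort th ts).2.length ≤ ts.length
  | [] => Nat.le_refl _
  | t :: ts => by
    simp only [spanShort]
    split
    · exact Nat.le_succ_of_le (spanShort_len th ts)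
    · exact Nat.le_refl _

-- Source B's outer while-loop: one recursion step per anchor
def fuseGo (th : Int) : List String → List String
  | [] => []
  | h :: rest =>
    if h ≠ "" then
      PySem.Str.join "\n\n" (h :: (spanShort th rest).1) :: fuseGo th (spanShort th rest).2
    else
      h :: fuseGo th rest
termination_by ts => ts.length
decreasing_by
  · exact Nat.lt_succ_of_le (spanShort_len th rest)
  · simp

def fuse_texts_alt (text_list : List String) (short_length_threshold : Int) : List String :=
  fuseGo short_length_threshold text_list

-- ===== PRECONDITION & SPEC =====
def Spec_fuse_texts (text_list : List String) (short_length_threshold : Int) (out : List String) : Prop := out = fuse_texts_alt text_list short_length_threshold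
instance (text_list : List String) (short_length_threshold : Int) (out : List String) : Decidable (Spec_fuse_texts text_list short_length_threshold out) := by unfold Spec_fuse_texts; infer_instance

-- ===== CLAIM =====
def Claim_equal_fuse_texts : Prop := ∀ (text_list : List String) (short_length_threshold : Int), Dom_fuse_texts text_list short_length_threshold → Spec_fuse_texts text_list short_length_threshold (fuse_texts text_list short_length_threshold)

-- ===== LEMMAS AND PROOFS =====

-- A's in-place concatenation, as a fold: the "join" a group accumulates in A
def joinAcc (j : String) (xs : List String) : String :=
  xs.foldl (fun s t => s ++ "\n\n" ++ t) j

theorem strJoin_singleton (sep t : String) : PySem.Str.join sep [t] = t := by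
  apply String.toList_inj.mp
  simp [PySem.Str.toList_join, PySem.Chars.join_singleton]

theorem strJoin_cons_cons (sep p q : String) (ps : List String) :
    PySem.Str.join sep (p :: q :: ps) = p ++ sep ++ PySem.Str.join sep (q :: ps) := by
  apply String.toList_inj.mp
  simp [PySem.Str.toList_join, PySem.Chars.join_cons_cons]

theorem strJoin_merge (sep a t : String) : ∀ (xs : List String),
    PySem.Str.join sep (a :: t :: xs) = PySem.Str.join sep ((a ++ sep ++ t) :: xs)
  | [] => by rw [strJoin_cons_cons, strJoin_singleton, strJoin_singleton]
  | u :: xs' => by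
    rw [strJoin_cons_cons, strJoin_cons_cons sep t u xs', strJoin_cons_cons sep (a ++ sep ++ t) u xs']
    simp [String.append_assoc]

theorem joinAcc_eq_join : ∀ (xs : List String) (a : String),
    joinAcc a xs = PySem.Str.join "\n\n" (a :: xs)
  | [], a => (strJoin_singleton "\n\n" a).symm
  | t :: xs, a => by
    show joinAcc (a ++ "\n\n" ++ t) xs = _
    rw [joinAcc_eq_join xs (a ++ "\n\n" ++ t), strJoin_merge]

-- unfolding lemmas for fuseGo
theorem fuseGo_nil (th : Int) : fuseGo th [] = [] := by simp [fuseGo]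

theorem fuseGo_cons (th : Int) (h : String) (rest : List String) :
    fuseGo th (h :: rest) =
      if h ≠ "" then
        PySem.Str.join "\n\n" (h :: (spanShort th rest).1) :: fuseGo th (spanShort th rest).2
      else
        h :: fuseGo th rest := by
  simp [fuseGo]

-- the two statements of the simulation, proved together by strong induction on length
def SimL1 (th : Int) (ts : List String) : Prop :=
  ∀ acc : List String, (ts.foldl (fuseStepA th) (acc, "")).1 = acc ++ fuseGo th ts

def SimL2 (th : Int) (ts : List String) : Prop :=
  ∀ (acc : List String) (j a : String), a ≠ "" →
    (ts.foldl (fuseStepA th) (acc ++ [j], a)).1 =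
      acc ++ joinAcc j (spanShort th ts).1 :: fuseGo th (spanShort th ts).2

theorem sim_main (th : Int) : ∀ (n : Nat) (ts : List String), ts.length ≤ n →
    SimL1 th ts ∧ SimL2 th ts := by
  intro n
  induction n with
  | zero =>
    intro ts hts
    have : ts = [] := List.eq_nil_of_length_eq_zero (Nat.le_zero.mp hts)
    subst this
    constructor
    · intro acc; simp [fuseGo_nil]
    · intro acc j a _
      simp [spanShort, fuseGo_nil, joinAcc]
  | succ n ih =>
    intro ts hts
    cases ts with
    | nil =>
      constructor
      · intro acc; simp [fuseGo_nil]
      · intro acc j a _; simp [spanShort, fuseGo_nil, joinAcc]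
    | cons t rest =>
      have hrest : rest.length ≤ n := Nat.le_of_succ_le_succ hts
      obtain ⟨ih1, ih2⟩ := ih rest hrest
      constructor
      · -- SimL1 on t :: rest: first iteration always takes the else branch (prev = "")
        intro acc
        simp only [List.foldl_cons]
        have h1 : fuseStepA th (acc, "") t = (acc ++ [t], t) := by
          unfold fuseStepA
          rw [if_neg]
          intro h; exact h.2 rfl
        rw [h1, fuseGo_cons]
        by_cases ht : t = ""
        · subst ht
          rw [if_neg (by simp)]
          rw [ih1 (acc ++ [""])]
          simp
        · rw [if_pos ht]
          rw [ih2 acc t t ht]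
          rw [joinAcc_eq_join]
      · -- SimL2 on t :: rest
        intro acc j a ha
        simp only [List.foldl_cons]
        by_cases hsh : shortB th t = true
        · -- short text: attaches to the current group
          have hcond : ((PySem.Str.split₀ t).length : Int) ≤ th ∧ a ≠ "" :=
            ⟨by simpa [shortB] using hsh, ha⟩
          have h1 : fuseStepA th (acc ++ [j], a) t = (acc ++ [j ++ "\n\n" ++ t], a) := by
            unfold fuseStepA
            rw [if_pos hcond]
            simp
          rw [h1, ih2 acc (j ++ "\n\n" ++ t) a ha]
          simp only [spanShort, hsh, if_pos]
          rfl
        · -- long text: t starts a new anchor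
          have hcond : ¬ (((PySem.Str.split₀ t).length : Int) ≤ th ∧ a ≠ "") := by
            intro h
            exact hsh (by simpa [shortB] using h.1)
          have h1 : fuseStepA th (acc ++ [j], a) t = ((acc ++ [j]) ++ [t], t) := by
            unfold fuseStepA
            rw [if_neg hcond]
          rw [h1]
          have hspan : spanShort th (t :: rest) = ([], t :: rest) := by
            simp [spanShort, hsh]
          rw [hspan]
          simp only [joinAcc, List.foldl_nil]
          rw [fuseGo_cons]
          by_cases ht : t = ""
          · subst ht
            rw [if_neg (by simp)]
            rw [ih1 (acc ++ [j] ++ [""])]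
            simp
          · rw [if_pos ht]
            rw [ih2 (acc ++ [j]) t t ht]
            rw [joinAcc_eq_join]
            simp

-- ===== VERDICT =====
theorem fuse_texts_spec : Claim_equal_fuse_texts := by
  intro tl th _
  unfold Spec_fuse_texts fuse_texts fuse_texts_alt
  have := (sim_main th tl.length tl (Nat.le_refl _)).1 []
  simpa using this
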